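-- pv_equiv track=rewrite | github.com/JamesZwq/nclique | pivoter/proj1/autotest_out_q2/5461235_q2_autotest.py | get_k_core
-- ===== SOURCE A (Python) =====
-- from collections import deque
-- from collections import deque, defaultdict
--
-- def get_k_core(adj, k):
--     """Extract k-core from subgraph"""
--     degree = {u: len(adj[u]) for u in adj}
--     q = deque([u for u in adj if degree[u] < k])
--     removed = set()
--
--     while q:
--         u = q.popleft()
--         removed.add(u)
--         for v in adj[u]:
--             if v not in removed:
--                 degree[v] -= 1
--                 if degree[v] == k - 1:
--                     q.append(v)
--
--     return set(adj.keys()) - removed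
-- ===== SOURCE B (Python) =====
-- def get_k_core(adj, k):
--     """Extract k-core from subgraph"""
--     alive = set(adj)
--     while True:
--         doomed = {u for u in alive
--                   if sum(1 for v in adj[u] if v in alive) < k}
--         if not doomed:
--             return alive
--         alive -= doomed
-- ===== Notes on version B (the rewrite author's own statement) =====
-- stated objective: alternative
-- what changed: Replaces A's degree-decrement worklist (deque plus a mutable degree dict) by a naive fixed-point peeling that on each pass rescans the whole alive set, removes every vertex whose surviving-neighbour count is below k, and stops when a pass removes nothing; Pre_ admits every input with k <= 0 and otherwise restricts to symmetric adjacency (each edge listed with equal multiplicity in both endpoints' lists), the natural undirected-subgraph domain, since on asymmetric input with k > 0 A either raises KeyError or returns values driven by its asymmetric in-degree-decrement bookkeeping.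
-- outside the precondition, e.g. on get_k_core({0: [1], 1: []}, 1): A returns {0}, B returns set(); on get_k_core({0: [5]}, 1): A returns {0}, B returns set()
import Mathlib
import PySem

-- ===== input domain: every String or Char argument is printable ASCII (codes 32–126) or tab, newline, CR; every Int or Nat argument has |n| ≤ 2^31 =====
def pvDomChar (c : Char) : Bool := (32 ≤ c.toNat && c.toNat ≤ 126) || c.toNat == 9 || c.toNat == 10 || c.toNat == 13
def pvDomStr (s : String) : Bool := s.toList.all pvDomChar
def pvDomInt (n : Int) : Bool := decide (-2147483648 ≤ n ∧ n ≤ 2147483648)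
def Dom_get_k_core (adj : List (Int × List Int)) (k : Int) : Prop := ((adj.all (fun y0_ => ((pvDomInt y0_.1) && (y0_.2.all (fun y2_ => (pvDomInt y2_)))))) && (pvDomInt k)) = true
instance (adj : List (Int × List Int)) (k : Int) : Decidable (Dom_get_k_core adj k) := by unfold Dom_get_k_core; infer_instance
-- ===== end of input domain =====

-- B replaces A's degree-decrement worklist (deque + mutable degree map) by a naive
-- fixed-point peeling that rescans the alive set each pass; objective: alternative
-- (genuinely different algorithm of similar size, not faster).

-- ===== PORT A =====
-- inner 'for v in adj[u]' body: decrement surviving neighbours, queue those hitting k-1.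
-- 'degree[v] -= 1' raises KeyError in Python when v is not a key; the port's 'modify' is
-- exact whenever v IS a key, which Pre_get_k_core guarantees for every neighbour.
def aInner (k : Int) (removed : PySem.Set Int) (st : PySem.Dict Int Int × List Int) (v : Int) :
    PySem.Dict Int Int × List Int :=
  if PySem.Set.contains removed v then st
  else
    let deg2 := st.1.modify v 0 (fun x => x - 1)
    if deg2.getD v 0 == k - 1 then (deg2, st.2 ++ [v]) else (deg2, st.2)

-- 'while q:' loop; the fuel only makes the recursion total (each pop adds a fresh key to
-- removed, so d.keys.length + 1 iterations are never exhausted — proved in pv_aLoop_spec).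
def aLoop (k : Int) (d : PySem.Dict Int (List Int)) :
    Nat → PySem.Dict Int Int → List Int → PySem.Set Int → PySem.Set Int
  | 0, _degree, _q, removed => removed
  | fuel + 1, degree, q, removed =>
    match q with
    | [] => removed
    | u :: q' =>
      let removed' := PySem.Set.add removed u
      let st := (d.getD u []).foldl (aInner k removed') (degree, q')
      aLoop k d fuel st.1 st.2 removed'

def get_k_core (adj : List (Int × List Int)) (k : Int) : List Int :=
  let d := PySem.Dict.ofList adj
  let degree : PySem.Dict Int Int :=
    d.keys.foldl (fun dd u => dd.insert u ((d.getD u []).length : Int)) PySem.Dict.empty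
  let q := d.keys.filter (fun u => decide (degree.getD u 0 < k))
  let removed := aLoop k d (d.keys.length + 1) degree q PySem.Set.empty
  PySem.Set.diff (PySem.Set.ofList d.keys) removed

-- ===== PORT B =====
-- termination helper for the peeling loop (cited by bLoop's decreasing_by)
theorem pv_diff_length_lt {s t : PySem.Set Int} (h : ∃ x ∈ s, x ∈ t) :
    (PySem.Set.diff s t).length < s.length := by
  have hd : PySem.Set.diff s t = s.filter (fun x => !(PySem.Set.contains t x)) := rfl
  rw [hd, List.length_filter_lt_length_iff_exists]
  obtain ⟨x, hx, hxt⟩ := h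
  exact ⟨x, hx, by simp [PySem.Set.contains_eq_listContains] at *; simpa using hxt⟩

-- the set comprehension 'doomed = {u for u in alive if sum(1 for v in adj[u] if v in alive) < k}'
def bDoomed (d : PySem.Dict Int (List Int)) (k : Int) (alive : PySem.Set Int) : PySem.Set Int :=
  alive.filter (fun u =>
    decide ((((d.getD u []).countP (fun v => PySem.Set.contains alive v)) : Int) < k))

def bLoop (d : PySem.Dict Int (List Int)) (k : Int) (alive : PySem.Set Int) : PySem.Set Int :=
  if (bDoomed d k alive).isEmpty then alive
  else bLoop d k (PySem.Set.diff alive (bDoomed d k alive))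
termination_by alive.length
decreasing_by
  rename_i hne
  apply pv_diff_length_lt
  obtain ⟨x, hx⟩ := List.exists_mem_of_ne_nil _ (by simpa [List.isEmpty_iff] using hne)
  exact ⟨x, (List.mem_filter.mp hx).1, hx⟩

def get_k_core_alt (adj : List (Int × List Int)) (k : Int) : List Int :=
  let d := PySem.Dict.ofList adj
  bLoop d k (PySem.Set.ofList d.keys)

-- ===== PRECONDITION & SPEC =====
-- Pre_ admits every input with k ≤ 0 (nothing is ever peeled) and otherwise restricts to
-- symmetric adjacency (each edge listed with equal multiplicity in both endpoints' lists),
-- the natural undirected-subgraph domain of a k-core routine: outside it A either raises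
-- KeyError (a peeled vertex with a neighbour that is not a key of adj) or returns values
-- driven by its asymmetric in-degree-decrement bookkeeping.
def Pre_get_k_core (adj : List (Int × List Int)) (k : Int) : Prop :=
  k ≤ 0 ∨ ∀ u ∈ (PySem.Dict.ofList adj).keys,
    ∀ v ∈ (PySem.Dict.ofList adj).getD u [],
      ((PySem.Dict.ofList adj).getD u []).count v = ((PySem.Dict.ofList adj).getD v []).count u
instance (adj : List (Int × List Int)) (k : Int) : Decidable (Pre_get_k_core adj k) := by
  unfold Pre_get_k_core; infer_instance

def pvWitness_get_k_core : (List (Int × List Int)) × Int := ([(0, [1, 2]), (1, [0, 2]), (2, [0, 1])], 2)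

def Spec_get_k_core (adj : List (Int × List Int)) (k : Int) (out : List Int) : Prop := out = get_k_core_alt adj k
instance (adj : List (Int × List Int)) (k : Int) (out : List Int) : Decidable (Spec_get_k_core adj k out) := by unfold Spec_get_k_core; infer_instance

-- ===== CLAIM (what is proved, stated in full; the proofs are below) =====
def Claim_equal_get_k_core : Prop := ∀ (adj : List (Int × List Int)) (k : Int), Dom_get_k_core adj k → Pre_get_k_core adj k → Spec_get_k_core adj k (get_k_core adj k)

-- ===== LEMMAS AND PROOFS =====

-- surviving degree of u once the vertices of R are removed (multiplicity counted)
def pvDeg (d : PySem.Dict Int (List Int)) (R : List Int) (u : Int) : Int :=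
  (((d.getD u []).countP (fun v => decide (v ∉ R))) : Int)

-- S is a k-core candidate: inside the key set, every member keeps degree ≥ k within S
def pvGood (d : PySem.Dict Int (List Int)) (k : Int) (S : List Int) : Prop :=
  (∀ x ∈ S, x ∈ d.keys) ∧ ∀ u ∈ S, k ≤ (((d.getD u []).countP (fun v => decide (v ∈ S))) : Int)

lemma pv_nodup_length_le {l l2 : List Int} (h : l.Nodup) (hs : ∀ x ∈ l, x ∈ l2) :
    l.length ≤ l2.length := by
  classical
  calc l.length = l.toFinset.card := (List.toFinset_card_of_nodup h).symm
  _ ≤ l2.toFinset.card := Finset.card_le_card (by intro x hx; simp only [List.mem_toFinset] at *; exact hs x hx)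
  _ ≤ l2.length := l2.toFinset_card_le

lemma pv_getD_nil_of_not_mem_keys (d : PySem.Dict Int (List Int)) (u : Int) (h : u ∉ d.keys) :
    d.getD u [] = [] := by
  apply PySem.Dict.getD_of_not_contains
  rw [← Bool.not_eq_true]
  intro hc
  exact h ((PySem.Dict.contains_iff_mem_keys d u).mp hc)

lemma pv_mem_keys_of_getD_ne_nil (d : PySem.Dict Int (List Int)) (v : Int)
    (h : d.getD v [] ≠ []) : v ∈ d.keys := by
  by_contra hv
  exact h (pv_getD_nil_of_not_mem_keys d v hv)

-- Pre_ gives unconditional multiplicity symmetry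
lemma pv_sym_of_pre (adj : List (Int × List Int))
    (hpre : ∀ u ∈ (PySem.Dict.ofList adj).keys,
      ∀ v ∈ (PySem.Dict.ofList adj).getD u [],
        ((PySem.Dict.ofList adj).getD u []).count v = ((PySem.Dict.ofList adj).getD v []).count u) :
    ∀ u v : Int, ((PySem.Dict.ofList adj).getD u []).count v = ((PySem.Dict.ofList adj).getD v []).count u := by
  intro u v
  set d := PySem.Dict.ofList adj with hd
  by_cases hv : v ∈ d.keys
  · by_cases huin : u ∈ d.getD v []
    · exact (hpre v hv u huin).symm
    · rw [List.count_eq_zero.mpr huin]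
      by_cases hu : u ∈ d.keys
      · by_cases hvin : v ∈ d.getD u []
        · have h1 := hpre u hu v hvin
          rw [List.count_eq_zero.mpr huin] at h1
          exact h1
        · rw [List.count_eq_zero.mpr hvin]
      · rw [pv_getD_nil_of_not_mem_keys d u hu]; simp
  · rw [pv_getD_nil_of_not_mem_keys d v hv]
    simp only [List.count_nil]
    by_cases hu : u ∈ d.keys
    · by_cases hvin : v ∈ d.getD u []
      · have h1 := hpre u hu v hvin
        rw [pv_getD_nil_of_not_mem_keys d v hv] at h1
        simp only [List.count_nil] at h1
        exact h1
      · rw [List.count_eq_zero.mpr hvin]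
    · rw [pv_getD_nil_of_not_mem_keys d u hu]; simp

-- under symmetry every listed neighbour is itself a key
lemma pv_nbr (d : PySem.Dict Int (List Int))
    (hsym : ∀ u v : Int, (d.getD u []).count v = (d.getD v []).count u) :
    ∀ u : Int, ∀ v ∈ d.getD u [], v ∈ d.keys := by
  intro u v hv
  apply pv_mem_keys_of_getD_ne_nil
  intro hnil
  have h1 := hsym u v
  rw [hnil] at h1
  simp only [List.count_nil] at h1
  have := List.count_pos_iff.mpr hv
  omega

lemma pv_countP_remove (l R : List Int) (u : Int) (hu : u ∉ R) :
    l.countP (fun v => decide (v ∉ R)) = l.countP (fun v => decide (v ∉ R ++ [u])) + l.count u := by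
  induction l with
  | nil => simp
  | cons a l ih =>
    simp only [List.countP_cons, List.count_cons, List.mem_append, List.mem_singleton]
    by_cases ha : a ∈ R <;> by_cases hau : a = u <;> subst_eqs <;> simp_all <;> omega

-- a nodup sublist of a nodup list is recovered by filtering on membership
lemma pv_filter_mem_of_sublist {s l : List Int} (h : s.Sublist l) (hnd : l.Nodup) :
    l.filter (fun x => decide (x ∈ s)) = s := by
  induction h with
  | slnil => simp
  | cons a h ih =>
    rename_i s' l₂
    have hal : a ∉ l₂ := (List.nodup_cons.mp hnd).1
    have has : a ∉ s' := fun hs => hal (h.subset hs)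
    simp only [List.filter_cons, decide_eq_true_eq]
    rw [if_neg (by simpa using has)]
    exact ih hnd.of_cons
  | cons₂ a h ih =>
    rename_i s' l₂
    have hal : a ∉ l₂ := (List.nodup_cons.mp hnd).1
    simp only [List.filter_cons, List.mem_cons, decide_eq_true_eq]
    rw [if_pos (by simp)]
    congr 1
    have hcg : List.filter (fun x => decide (x = a ∨ x ∈ s')) l₂
        = List.filter (fun x => decide (x ∈ s')) l₂ :=
      List.filter_congr (fun x hx => by
        have hxa : x ≠ a := fun he => hal (he ▸ hx)
        simp [hxa])
    rw [hcg, ih hnd.of_cons]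

lemma pv_contains_decide (alive : PySem.Set Int) (v : Int) :
    PySem.Set.contains alive v = decide (v ∈ alive) :=
  Bool.eq_iff_iff.mpr (by rw [PySem.Set.contains_iff]; simp)

lemma pv_deg_mono (d : PySem.Dict Int (List Int)) {R1 R2 : List Int}
    (h : ∀ x ∈ R1, x ∈ R2) (w : Int) : pvDeg d R2 w ≤ pvDeg d R1 w := by
  unfold pvDeg
  have := List.countP_mono_left (l := d.getD w [])
    (p := fun v => decide (v ∉ R2)) (q := fun v => decide (v ∉ R1))
    (by intro a _ ha; simp only [decide_eq_true_eq] at *; exact fun h1 => ha (h a h1))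
  exact_mod_cast this

lemma pv_good_le_deg (d : PySem.Dict Int (List Int)) (k : Int) (S R' : List Int)
    (hS : ∀ w ∈ S, w ∉ R') (x : Int) (hx : x ∈ S)
    (hgood : k ≤ (((d.getD x []).countP (fun v => decide (v ∈ S))) : Int)) :
    k ≤ pvDeg d R' x := by
  unfold pvDeg
  have := List.countP_mono_left (l := d.getD x [])
    (p := fun v => decide (v ∈ S)) (q := fun v => decide (v ∉ R'))
    (by intro a _ ha; simp only [decide_eq_true_eq] at *; exact hS a ha)
  omega

-- effect of one inner 'for v in adj[u]' pass on the degree dict and the queue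
lemma pv_inner_spec (k : Int) (R' : PySem.Set Int) (L : List Int) :
    ∀ (degree : PySem.Dict Int Int) (q : List Int),
    (∀ v, (L.foldl (aInner k R') (degree, q)).1.getD v 0
        = if v ∈ R' then degree.getD v 0 else degree.getD v 0 - (L.count v : Int))
    ∧ ∃ p : List Int, (L.foldl (aInner k R') (degree, q)).2 = q ++ p ∧ p.Nodup
        ∧ (∀ v, v ∈ p ↔ (v ∉ R' ∧ k ≤ degree.getD v 0 ∧ degree.getD v 0 - (L.count v : Int) ≤ k - 1)) := by
  induction L with
  | nil =>
    intro degree q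
    refine ⟨by intro v; simp, [], by simp, List.nodup_nil, ?_⟩
    intro v
    simp only [List.not_mem_nil, List.count_nil, false_iff]
    rintro ⟨-, h1, h2⟩
    omega
  | cons v0 L ih =>
    intro degree q
    by_cases hv0 : v0 ∈ R'
    · have hstep : aInner k R' (degree, q) v0 = (degree, q) := by
        simp [aInner, hv0]
      obtain ⟨h1, p, hp1, hp2, hp3⟩ := ih degree q
      simp only [List.foldl_cons, hstep]
      refine ⟨?_, p, hp1, hp2, ?_⟩
      · intro v
        rw [h1 v]
        by_cases hvR : v ∈ R'
        · simp [hvR]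
        · have hne : ¬ v0 = v := fun he => hvR (he ▸ hv0)
          simp [hvR, hne]
      · intro v
        rw [hp3 v]
        by_cases hvv : v = v0
        · subst hvv; simp [hv0]
        · have hne : ¬ v0 = v := fun he => hvv he.symm
          simp [hne]
    · have hd2v0 : (degree.modify v0 0 (fun x => x - 1)).getD v0 0 = degree.getD v0 0 - 1 :=
        PySem.Dict.getD_modify_self degree v0 0 _
      have hd2 : ∀ v : Int, v ≠ v0 →
          (degree.modify v0 0 (fun x => x - 1)).getD v 0 = degree.getD v 0 := by
        intro v hne
        rw [PySem.Dict.getD_modify]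
        simp [hne]
      by_cases hpush : degree.getD v0 0 - 1 = k - 1
      · have hpk : degree.getD v0 0 = k := by omega
        have hstep : aInner k R' (degree, q) v0
            = (degree.modify v0 0 (fun x => x - 1), q ++ [v0]) := by
          simp [aInner, hv0, hd2v0, hpk]
        obtain ⟨h1, p, hp1, hp2, hp3⟩ := ih (degree.modify v0 0 (fun x => x - 1)) (q ++ [v0])
        simp only [List.foldl_cons, hstep]
        have hv0p : v0 ∉ p := by
          intro hin
          have := (hp3 v0).mp hin
          rw [hd2v0] at this
          omega
        refine ⟨?_, v0 :: p, by rw [hp1, List.append_assoc]; rfl, List.nodup_cons.mpr ⟨hv0p, hp2⟩, ?_⟩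
        · intro v
          rw [h1 v]
          by_cases hvR : v ∈ R'
          · have hvne : v ≠ v0 := fun he => hv0 (he ▸ hvR)
            simp [hvR, hd2 v hvne]
          · by_cases hvv : v = v0
            · subst hvv
              simp only [hvR, if_false, hd2v0, List.count_cons_self]
              push_cast
              ring
            · have hne : ¬ v0 = v := fun he => hvv he.symm
              simp only [hvR, if_false, hd2 v hvv, List.count_cons, beq_iff_eq, hne,
                if_false, add_zero]
        · intro v
          by_cases hvv : v = v0
          · subst hvv
            simp only [List.mem_cons, true_or, true_iff]
            refine ⟨hv0, ?_, ?_⟩ <;> push_cast [List.count_cons_self] <;> omega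
          · have hne : ¬ v0 = v := fun he => hvv he.symm
            have hmem : v ∈ v0 :: p ↔ v ∈ p := by simp [hvv]
            rw [hmem, hp3 v, hd2 v hvv]
            simp only [List.count_cons, beq_iff_eq, hne, if_false, add_zero]
      · have hpk : ¬ degree.getD v0 0 = k := by omega
        have hstep : aInner k R' (degree, q) v0
            = (degree.modify v0 0 (fun x => x - 1), q) := by
          simp [aInner, hv0, hd2v0, hpk]
        obtain ⟨h1, p, hp1, hp2, hp3⟩ := ih (degree.modify v0 0 (fun x => x - 1)) q
        simp only [List.foldl_cons, hstep]
        refine ⟨?_, p, hp1, hp2, ?_⟩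
        · intro v
          rw [h1 v]
          by_cases hvR : v ∈ R'
          · have hvne : v ≠ v0 := fun he => hv0 (he ▸ hvR)
            simp [hvR, hd2 v hvne]
          · by_cases hvv : v = v0
            · subst hvv
              simp only [hvR, if_false, hd2v0, List.count_cons_self]
              push_cast
              ring
            · have hne : ¬ v0 = v := fun he => hvv he.symm
              simp only [hvR, if_false, hd2 v hvv, List.count_cons, beq_iff_eq, hne,
                if_false, add_zero]
        · intro v
          rw [hp3 v]
          by_cases hvv : v = v0
          · subst hvv
            rw [hd2v0]
            simp only [List.count_cons_self]
            constructor
            · rintro ⟨a, b, c⟩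
              refine ⟨a, by omega, by push_cast; omega⟩
            · rintro ⟨a, b, c⟩
              push_cast at c
              exact ⟨a, by omega, by omega⟩
          · have hne : ¬ v0 = v := fun he => hvv he.symm
            rw [hd2 v hvv]
            simp only [List.count_cons, beq_iff_eq, hne, if_false, add_zero]

-- invariant of A's worklist loop: the final removed set leaves only high-degree vertices,
-- and never touches any k-core candidate set
lemma pv_aLoop_spec (d : PySem.Dict Int (List Int)) (k : Int)
    (hsym : ∀ u v : Int, (d.getD u []).count v = (d.getD v []).count u) :
    ∀ (fuel : Nat) (degree : PySem.Dict Int Int) (q R : List Int),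
    R.Nodup → (∀ x ∈ R, x ∈ d.keys) →
    q.Nodup → (∀ x ∈ q, x ∈ d.keys) → (∀ x ∈ q, x ∉ R) →
    (∀ u ∈ d.keys, u ∉ R → degree.getD u 0 = pvDeg d R u) →
    (∀ u ∈ d.keys, u ∉ R → u ∉ q → k ≤ pvDeg d R u) →
    (∀ u ∈ q, pvDeg d R u ≤ k - 1) →
    (∀ S, pvGood d k S → ∀ x ∈ S, x ∉ R ∧ x ∉ q) →
    d.keys.length < fuel + R.length →
    (∀ u ∈ d.keys, u ∉ aLoop k d fuel degree q R → k ≤ pvDeg d (aLoop k d fuel degree q R) u)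
    ∧ (∀ S, pvGood d k S → ∀ x ∈ S, x ∉ aLoop k d fuel degree q R) := by
  intro fuel
  induction fuel with
  | zero =>
    intro degree q R hRnd hRK _ _ _ _ _ _ _ hfuel
    have := pv_nodup_length_le hRnd hRK
    omega
  | succ n ihf =>
    intro degree q R hRnd hRK hqnd hqK hqR hI6 hI7 hI8 hG hfuel
    match q with
    | [] =>
      refine ⟨?_, ?_⟩
      · intro u hu hnR
        exact hI7 u hu (by simpa using hnR) (by simp)
      · intro S hS x hx
        exact (hG S hS x hx).1
    | u :: q' =>
      have huK : u ∈ d.keys := hqK u List.mem_cons_self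
      have huR : u ∉ R := hqR u List.mem_cons_self
      have huq' : u ∉ q' := (List.nodup_cons.mp hqnd).1
      have hq'nd : q'.Nodup := (List.nodup_cons.mp hqnd).2
      have hadd : PySem.Set.add R u = R ++ [u] := PySem.Set.add_of_not_mem huR
      have hred : aLoop k d (n + 1) degree (u :: q') R
          = aLoop k d n ((d.getD u []).foldl (aInner k (PySem.Set.add R u)) (degree, q')).1
              ((d.getD u []).foldl (aInner k (PySem.Set.add R u)) (degree, q')).2
              (PySem.Set.add R u) := rfl
      rw [hred, hadd]
      obtain ⟨hdegf, p, hq2, hpnd, hpchar⟩ :=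
        pv_inner_spec k (R ++ [u]) (d.getD u []) degree q'
      rw [hq2]
      have hmemR' : ∀ v : Int, v ∈ R ++ [u] ↔ v ∈ R ∨ v = u := by
        intro v; simp [List.mem_append]
      -- degree drop when u is removed (this is where symmetry enters)
      have hDeg : ∀ w : Int, pvDeg d (R ++ [u]) w = pvDeg d R w - ((d.getD u []).count w : Int) := by
        intro w
        have h1 := pv_countP_remove (d.getD w []) R u huR
        have h2 : (d.getD w []).count u = (d.getD u []).count w := hsym w u
        unfold pvDeg
        omega
      have hdeg_eq : ∀ w ∈ d.keys, w ∉ R ++ [u] →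
          ((d.getD u []).foldl (aInner k (R ++ [u])) (degree, q')).1.getD w 0
            = pvDeg d (R ++ [u]) w := by
        intro w hwK hwR'
        rw [hdegf w, if_neg hwR', hI6 w hwK (fun h => hwR' ((hmemR' w).mpr (Or.inl h))), hDeg w]
      have hpR' : ∀ v ∈ p, v ∉ R ++ [u] := fun v hv => ((hpchar v).mp hv).1
      have hpK : ∀ v ∈ p, v ∈ d.keys := by
        intro v hv
        obtain ⟨-, h1, h2⟩ := (hpchar v).mp hv
        have hc : 0 < (d.getD u []).count v := by omega
        exact pv_nbr d hsym u v (List.count_pos_iff.mp hc)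
      have hpdegold : ∀ v ∈ p, degree.getD v 0 = pvDeg d R v := by
        intro v hv
        exact hI6 v (hpK v hv) (fun h => hpR' v hv ((hmemR' v).mpr (Or.inl h)))
      have hpbelow : ∀ v ∈ p, pvDeg d (R ++ [u]) v ≤ k - 1 := by
        intro v hv
        obtain ⟨-, h1, h2⟩ := (hpchar v).mp hv
        rw [hpdegold v hv] at h2
        rw [hDeg v]
        omega
      have hq'ndisj : ∀ v ∈ q', v ∉ p := by
        intro v hv hvp
        obtain ⟨-, h1, -⟩ := (hpchar v).mp hvp
        have hvK := hqK v (List.mem_cons_of_mem u hv)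
        have hvR := hqR v (List.mem_cons_of_mem u hv)
        have := hI8 v (List.mem_cons_of_mem u hv)
        rw [hI6 v hvK hvR] at h1
        omega
      have hGnew : ∀ S, pvGood d k S → ∀ x ∈ S, x ∉ R ++ [u] ∧ x ∉ q' ++ p := by
        intro S hS x hx
        have hold := hG S hS x hx
        have hxu : x ≠ u := fun he => hold.2 (he ▸ List.mem_cons_self)
        have hxR' : x ∉ R ++ [u] := by
          rw [hmemR' x]; rintro (h | h); exacts [hold.1 h, hxu h]
        refine ⟨hxR', ?_⟩
        rw [List.mem_append]
        rintro (h | h)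
        · exact hold.2 (List.mem_cons_of_mem u h)
        · have hSR' : ∀ w ∈ S, w ∉ R ++ [u] := by
            intro w hw
            have holdw := hG S hS w hw
            have hwu : w ≠ u := fun he => holdw.2 (he ▸ List.mem_cons_self)
            rw [hmemR' w]; rintro (hh | hh); exacts [holdw.1 hh, hwu hh]
          have hk := pv_good_le_deg d k S (R ++ [u]) hSR' x hx (hS.2 x hx)
          have := hpbelow x h
          omega
      apply ihf
      · simp [List.nodup_append]
        exact ⟨hRnd, fun x hx he => huR (he ▸ hx)⟩
      · intro x hx
        rcases (hmemR' x).mp hx with h | h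
        exacts [hRK x h, h ▸ huK]
      · rw [List.nodup_append]
        refine ⟨hq'nd, hpnd, ?_⟩
        intro a ha b hb he
        exact hq'ndisj a ha (he ▸ hb)
      · intro x hx
        rcases List.mem_append.mp hx with h | h
        exacts [hqK x (List.mem_cons_of_mem u h), hpK x h]
      · intro x hx
        rcases List.mem_append.mp hx with h | h
        · rw [hmemR' x]
          rintro (hh | hh)
          · exact hqR x (List.mem_cons_of_mem u h) hh
          · exact huq' (hh ▸ h)
        · exact hpR' x h
      · exact hdeg_eq
      · intro w hwK hwR' hwqp
        rw [List.mem_append] at hwqp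
        push Not at hwqp
        have hwu : w ≠ u := fun he => hwR' ((hmemR' w).mpr (Or.inr he))
        have hwR : w ∉ R := fun h => hwR' ((hmemR' w).mpr (Or.inl h))
        have hwq : w ∉ u :: q' := by
          rw [List.mem_cons]; rintro (h | h); exacts [hwu h, hwqp.1 h]
        have hold := hI7 w hwK hwR hwq
        have : ¬ (w ∉ R ++ [u] ∧ k ≤ pvDeg d R w ∧ pvDeg d R w - ((d.getD u []).count w : Int) ≤ k - 1) := by
          intro hh
          exact hwqp.2 ((hpchar w).mpr (by rw [hI6 w hwK hwR]; exact hh))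
        rw [hDeg w]
        by_cases hc : pvDeg d R w - ((d.getD u []).count w : Int) ≤ k - 1
        · exact absurd ⟨hwR', hold, hc⟩ this
        · omega
      · intro v hv
        rcases List.mem_append.mp hv with h | h
        · have := hI8 v (List.mem_cons_of_mem u h)
          have hmono := pv_deg_mono d (R1 := R) (R2 := R ++ [u]) (fun x hx => (hmemR' x).mpr (Or.inl hx)) v
          omega
        · exact hpbelow v h
      · exact hGnew
      · simp only [List.length_append, List.length_cons] at *
        omega

-- invariant of B's rescan loop: the result is a k-core candidate containing every candidate
lemma pv_bLoop_spec (d : PySem.Dict Int (List Int)) (k : Int) :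
    ∀ (n : Nat) (alive : List Int), alive.length ≤ n → alive.Nodup → (∀ x ∈ alive, x ∈ d.keys) →
    (bLoop d k alive).Sublist alive
    ∧ pvGood d k (bLoop d k alive)
    ∧ (∀ S, pvGood d k S → (∀ x ∈ S, x ∈ alive) → ∀ x ∈ S, x ∈ bLoop d k alive) := by
  intro n
  induction n with
  | zero =>
    intro alive hlen _ _
    have : alive = [] := List.eq_nil_of_length_eq_zero (by omega)
    subst this
    have hb : bLoop d k [] = [] := by rw [bLoop]; simp [bDoomed]
    rw [hb]
    exact ⟨List.Sublist.refl _, ⟨by simp, by simp⟩, fun S hS hsub x hx => hsub x hx⟩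
  | succ n ih =>
    intro alive hlen hnd hK
    rw [bLoop]
    by_cases he : (bDoomed d k alive).isEmpty
    · rw [if_pos he]
      refine ⟨List.Sublist.refl _, ⟨hK, ?_⟩, fun S hS hsub x hx => hsub x hx⟩
      intro u hu
      have hnil : bDoomed d k alive = [] := List.isEmpty_iff.mp he
      have := List.filter_eq_nil_iff.mp hnil u hu
      simp only [decide_eq_true_eq, not_lt] at this
      calc k ≤ (((d.getD u []).countP (fun v => PySem.Set.contains alive v)) : Int) := this
        _ = (((d.getD u []).countP (fun v => decide (v ∈ alive))) : Int) := by
            congr 1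
            exact List.countP_congr (fun v _ => by rw [pv_contains_decide])
    · rw [if_neg he]
      have hdne : bDoomed d k alive ≠ [] := fun h => he (by simp [h])
      have hsubl : (PySem.Set.diff alive (bDoomed d k alive)).Sublist alive := by
        have hd : PySem.Set.diff alive (bDoomed d k alive)
            = alive.filter (fun x => !(PySem.Set.contains (bDoomed d k alive) x)) := rfl
        rw [hd]; exact List.filter_sublist
      have hlt : (PySem.Set.diff alive (bDoomed d k alive)).length < alive.length := by
        apply pv_diff_length_lt
        obtain ⟨x, hx⟩ := List.exists_mem_of_ne_nil _ hdne
        exact ⟨x, (List.mem_filter.mp hx).1, hx⟩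
      obtain ⟨ihA, ihB, ihC⟩ := ih (PySem.Set.diff alive (bDoomed d k alive))
        (by omega) (hnd.sublist hsubl) (fun x hx => hK x (hsubl.subset hx))
      refine ⟨ihA.trans hsubl, ihB, ?_⟩
      intro S hS hsub x hx
      apply ihC S hS _ x hx
      intro y hy
      have hyal : y ∈ alive := hsub y hy
      have hynd : y ∉ bDoomed d k alive := by
        intro hyd
        have := (List.mem_filter.mp hyd).2
        simp only [decide_eq_true_eq] at this
        have hmono : ((d.getD y []).countP (fun v => decide (v ∈ S)))
            ≤ ((d.getD y []).countP (fun v => PySem.Set.contains alive v)) := by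
          apply List.countP_mono_left
          intro a _ ha
          simp only [decide_eq_true_eq] at ha
          rw [pv_contains_decide]
          simp [hsub a ha]
        have hk := hS.2 y hy
        omega
      exact (PySem.Set.mem_diff _ _ _).mpr ⟨hyal, hynd⟩

-- ===== VERDICT (by name: the statement is the Claim_ definition above) =====
theorem get_k_core_spec : Claim_equal_get_k_core := by
  intro adj k _hdom hpre
  unfold Spec_get_k_core get_k_core get_k_core_alt
  simp only []
  set d := PySem.Dict.ofList adj with hd
  have hnd : d.keys.Nodup := PySem.Dict.nodup_keys_ofList adj
  rcases hpre with hk0 | hpre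
  · -- k ≤ 0: neither side removes anything; both return the key set
    have hofl : PySem.Set.ofList d.keys = d.keys := PySem.Set.ofList_eq_self_of_nodup d.keys hnd
    simp only [hofl]
    set deg0 := d.keys.foldl (fun dd u => dd.insert u ((d.getD u []).length : Int)) PySem.Dict.empty with hdeg0
    have hq0nil : d.keys.filter (fun u => decide (deg0.getD u 0 < k)) = [] := by
      apply List.filter_eq_nil_iff.mpr
      intro u hu
      simp only [decide_eq_true_eq, not_lt]
      calc k ≤ 0 := hk0
        _ ≤ deg0.getD u 0 := by
            have hit : deg0.items = d.keys.map (fun u => (u, ((d.getD u []).length : Int))) := by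
              have h := PySem.Dict.items_foldl_insert_fresh (l := d.keys) (d := PySem.Dict.empty)
                (k := fun u => u) (v := fun u => ((d.getD u []).length : Int))
                (by intro a _; simp) (by simpa using hnd)
              simpa using h
            have hk0' : deg0.keys = d.keys := by
              have h1 : deg0.keys = deg0.items.map Prod.fst := rfl
              rw [h1, hit, List.map_map]
              simp [Function.comp_def]
            have := PySem.Dict.getD_of_mem_items (d := deg0)
              (by rw [hit]; exact List.mem_map.mpr ⟨u, hu, rfl⟩) (by rw [hk0']; exact hnd) (d0 := 0)
            rw [this]
            positivity
    rw [hq0nil]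
    have hA : aLoop k d (d.keys.length + 1) deg0 [] PySem.Set.empty = PySem.Set.empty := rfl
    rw [hA]
    have hdiff : PySem.Set.diff d.keys PySem.Set.empty = d.keys := by
      have h1 : PySem.Set.diff d.keys PySem.Set.empty
          = d.keys.filter (fun x => !(PySem.Set.contains PySem.Set.empty x)) := rfl
      rw [h1]
      apply List.filter_eq_self.mpr
      intro x _
      rw [pv_contains_decide]
      simp [PySem.Set.empty]
    have hB : bLoop d k d.keys = d.keys := by
      rw [bLoop]
      have hdn : bDoomed d k d.keys = [] := by
        apply List.filter_eq_nil_iff.mpr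
        intro u _
        simp only [decide_eq_true_eq, not_lt]
        have : (0 : Int) ≤ (((d.getD u []).countP (fun v => PySem.Set.contains d.keys v)) : Int) := by positivity
        omega
      rw [if_pos (by simp [hdn])]
    rw [hdiff, hB]
  have hsym := pv_sym_of_pre adj hpre
  have hofl : PySem.Set.ofList d.keys = d.keys := PySem.Set.ofList_eq_self_of_nodup d.keys hnd
  simp only [hofl]
  set deg0 := d.keys.foldl (fun dd u => dd.insert u ((d.getD u []).length : Int)) PySem.Dict.empty with hdeg0
  have hitems : deg0.items = d.keys.map (fun u => (u, ((d.getD u []).length : Int))) := by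
    have h := PySem.Dict.items_foldl_insert_fresh (l := d.keys) (d := PySem.Dict.empty)
      (k := fun u => u) (v := fun u => ((d.getD u []).length : Int))
      (by intro a _; simp) (by simpa using hnd)
    simpa using h
  have hkeys0 : deg0.keys = d.keys := by
    have h1 : deg0.keys = deg0.items.map Prod.fst := rfl
    rw [h1, hitems, List.map_map]
    simp [Function.comp_def]
  have hget0 : ∀ u ∈ d.keys, deg0.getD u 0 = ((d.getD u []).length : Int) := by
    intro u hu
    apply PySem.Dict.getD_of_mem_items
    · rw [hitems]
      exact List.mem_map.mpr ⟨u, hu, rfl⟩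
    · rw [hkeys0]; exact hnd
  have hdeg_nil : ∀ u : Int, pvDeg d PySem.Set.empty u = ((d.getD u []).length : Int) := by
    intro u; unfold pvDeg; simp [PySem.Set.empty]
  set q0 := d.keys.filter (fun u => decide (deg0.getD u 0 < k)) with hq0
  obtain ⟨hP1, hP2⟩ := pv_aLoop_spec d k hsym (d.keys.length + 1) deg0 q0 PySem.Set.empty
    List.nodup_nil (by simp [PySem.Set.empty])
    (hnd.filter _) (fun x hx => (List.mem_filter.mp hx).1) (by simp [PySem.Set.empty])
    (fun u hu _ => by rw [hget0 u hu, hdeg_nil u])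
    (fun u hu _ hq => by
      rw [hdeg_nil u]
      have : ¬ (deg0.getD u 0 < k) := by
        intro hlt
        exact hq (List.mem_filter.mpr ⟨hu, by simpa using hlt⟩)
      rw [hget0 u hu] at this
      omega)
    (fun u hu => by
      have h2 := (List.mem_filter.mp hu).2
      have h1 := (List.mem_filter.mp hu).1
      simp only [decide_eq_true_eq] at h2
      rw [hget0 u h1] at h2
      rw [hdeg_nil u]
      omega)
    (fun S hS x hx => by
      refine ⟨by simp [PySem.Set.empty], ?_⟩
      intro hxq
      have h2 := (List.mem_filter.mp hxq).2
      simp only [decide_eq_true_eq] at h2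
      rw [hget0 x (hS.1 x hx)] at h2
      have hk := hS.2 x hx
      have hle : ((d.getD x []).countP (fun v => decide (v ∈ S)) : Int)
          ≤ ((d.getD x []).length : Int) := by
        exact_mod_cast List.countP_le_length
      omega)
    (by simp [PySem.Set.empty])
  set Rf := aLoop k d (d.keys.length + 1) deg0 q0 PySem.Set.empty with hRf
  have hAout : PySem.Set.diff d.keys Rf = d.keys.filter (fun x => !(PySem.Set.contains Rf x)) := rfl
  obtain ⟨ihA, ihB, ihC⟩ := pv_bLoop_spec d k d.keys.length d.keys le_rfl hnd (fun x hx => hx)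
  set Bout := bLoop d k d.keys with hBout
  have hSAmem : ∀ x : Int, x ∈ d.keys.filter (fun x => !(PySem.Set.contains Rf x)) ↔ x ∈ d.keys ∧ x ∉ Rf := by
    intro x
    rw [List.mem_filter, pv_contains_decide]
    simp
  have hSAgood : pvGood d k (d.keys.filter (fun x => !(PySem.Set.contains Rf x))) := by
    constructor
    · intro x hx; exact ((hSAmem x).mp hx).1
    · intro u hu
      obtain ⟨huK, huR⟩ := (hSAmem u).mp hu
      have hkdeg := hP1 u huK huR
      unfold pvDeg at hkdeg
      have hcong : (d.getD u []).countP (fun v => decide (v ∈ d.keys.filter (fun x => !(PySem.Set.contains Rf x))))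
          = (d.getD u []).countP (fun v => decide (v ∉ Rf)) := by
        apply List.countP_congr
        intro v hv
        have hvK : v ∈ d.keys := pv_nbr d hsym u v hv
        simp only [decide_eq_true_eq]
        rw [hSAmem v]
        constructor
        · exact fun h => h.2
        · exact fun h => ⟨hvK, h⟩
      rw [hcong]
      exact hkdeg
  have hforward : ∀ x ∈ d.keys, x ∉ Rf → x ∈ Bout := by
    intro x hxK hxR
    exact ihC _ hSAgood (fun y hy => ((hSAmem y).mp hy).1) x ((hSAmem x).mpr ⟨hxK, hxR⟩)
  have hback : ∀ x ∈ Bout, x ∉ Rf :=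
    fun x hx => hP2 Bout ihB x hx
  rw [hAout]
  have hBfil : d.keys.filter (fun x => decide (x ∈ Bout)) = Bout :=
    pv_filter_mem_of_sublist ihA hnd
  rw [← hBfil]
  apply List.filter_congr
  intro x hxK
  rw [pv_contains_decide]
  have hiff : (x ∉ Rf) ↔ (x ∈ Bout) := ⟨fun h => hforward x hxK h, fun hb => hback x hb⟩
  apply Bool.eq_iff_iff.mpr
  simp [hiff]
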